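-- pv_equiv track=rewrite | github.com/tadeubarroso/explainerdashboard-master | explainerdashboard/dashboard_components/overview_components.py | get_slices_rows_first
-- ===== SOURCE A (Python) =====
-- def get_slices_rows_first(n_inputs, n_cols=3):
--     """returns a list of slices to divide n inputs into n_cols columns,
--     filling rows first"""
--     if n_inputs == 0: return []
--     n_cols = min(n_cols, n_inputs) # Ensure n_cols is not greater than n_inputs
--     slices = []
--     for i in range(n_cols):
--          # Create list of indices for this column
--          indices = list(range(i, n_inputs, n_cols))
--          if indices:
--              # Convert list of indices to slice-like behavior if needed by consumer
--              # Or simply return the list of indices per column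
--              # Returning list of indices is more flexible
--              # slices.append(indices)
--              # Sticking to slice for now, assuming consumer wants slices (might be less intuitive for row-first)
--              # This slice logic for row-first might not be what's expected.
--              # A simpler approach might be to just return lists of indices per column.
--              # Let's try returning lists of indices instead.
--              slices.append(indices)
--
--     # The original slice logic for rows_first was complex and potentially incorrect.
--     # Returning lists of indices is clearer for column generation.
--     # If the consumer *requires* slices, the logic needs careful review.
--     # For now, adjusting the layout method to handle lists of indices.
--     return slices # Now returns lists of indices, not slices
-- ===== SOURCE B (Python) =====
-- def get_slices_rows_first(n_inputs, n_cols=3):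
--     """Round-robin: one pass over the indices, dispatching j to column j % m."""
--     m = min(n_cols, n_inputs)
--     if m <= 0:
--         return []
--     cols = [[] for _ in range(m)]
--     for j in range(n_inputs):
--         cols[j % m].append(j)
--     return cols
-- ===== Notes on version B (the rewrite author's own statement) =====
-- stated objective: faster
-- what changed: A builds each column separately as a strided range(i, n, n_cols) in an outer loop over columns; B makes a single round-robin pass over the indices, dispatching index j to column j % m of a pre-allocated list of m empty columns (loop nest inverted, one traversal, no per-column range materialisation).
import Mathlib
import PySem

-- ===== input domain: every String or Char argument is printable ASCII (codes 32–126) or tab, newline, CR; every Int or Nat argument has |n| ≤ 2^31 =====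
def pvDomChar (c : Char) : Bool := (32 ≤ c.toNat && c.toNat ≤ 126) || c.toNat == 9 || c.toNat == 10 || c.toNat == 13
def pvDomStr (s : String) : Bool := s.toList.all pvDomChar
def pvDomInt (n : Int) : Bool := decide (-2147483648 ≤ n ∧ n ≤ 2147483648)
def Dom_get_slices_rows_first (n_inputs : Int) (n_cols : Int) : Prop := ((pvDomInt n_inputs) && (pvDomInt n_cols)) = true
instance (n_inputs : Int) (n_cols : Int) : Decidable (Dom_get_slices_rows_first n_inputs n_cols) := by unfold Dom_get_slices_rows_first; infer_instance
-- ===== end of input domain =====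

-- B replaces A's per-column strided ranges by a single round-robin pass over the indices (objective: idiomatic/alternative).

-- ===== PORT A =====
def get_slices_rows_first (n_inputs : Int) (n_cols : Int) : List (List Int) :=
  if n_inputs = 0 then []
  else
    let nc := min n_cols n_inputs
    (PySem.List.pyRange 0 nc 1).foldl
      (fun slices i =>
        let indices := PySem.List.pyRange i n_inputs nc
        if indices ≠ [] then slices ++ [indices] else slices)
      []

-- ===== PORT B =====
def get_slices_rows_first_alt (n_inputs : Int) (n_cols : Int) : List (List Int) :=
  let m := min n_cols n_inputs
  if m ≤ 0 then []
  else
    (PySem.List.pyRange 0 n_inputs 1).foldl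
      (fun cols j => cols.modify (PySem.Int.mod j m).toNat (fun col => col ++ [j]))
      (List.replicate m.toNat [])

-- ===== PRECONDITION & SPEC =====
def Spec_get_slices_rows_first (n_inputs : Int) (n_cols : Int) (out : List (List Int)) : Prop := out = get_slices_rows_first_alt n_inputs n_cols
instance (n_inputs : Int) (n_cols : Int) (out : List (List Int)) : Decidable (Spec_get_slices_rows_first n_inputs n_cols out) := by unfold Spec_get_slices_rows_first; infer_instance

-- ===== CLAIM (what is proved, stated in full; the proofs are below) =====
def Claim_equal_get_slices_rows_first : Prop := ∀ (n_inputs : Int) (n_cols : Int), Dom_get_slices_rows_first n_inputs n_cols → Spec_get_slices_rows_first n_inputs n_cols (get_slices_rows_first n_inputs n_cols)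

-- ===== LEMMAS AND PROOFS =====

-- two strictly increasing integer lists with the same members are equal
lemma eq_of_pairwise_lt_of_mem_iff (l1 l2 : List Int)
    (h1 : l1.Pairwise (· < ·)) (h2 : l2.Pairwise (· < ·))
    (hm : ∀ x, x ∈ l1 ↔ x ∈ l2) : l1 = l2 := by
  induction l1 generalizing l2 with
  | nil =>
    cases l2 with
    | nil => rfl
    | cons b t => exact absurd ((hm b).2 (by simp)) (by simp)
  | cons a t ih =>
    cases l2 with
    | nil => exact absurd ((hm a).1 (by simp)) (by simp)
    | cons b t' =>
      have ha : a = b := by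
        have hab : a = b ∨ a ∈ t' := by simpa using (hm a).1 (by simp)
        have hba : b = a ∨ b ∈ t := by simpa using (hm b).2 (by simp)
        rcases hab with h | h
        · exact h
        · rcases hba with h' | h'
          · exact h'.symm
          · have := (List.pairwise_cons.1 h1).1 b h'
            have := (List.pairwise_cons.1 h2).1 a h
            omega
      subst ha
      have ht : t = t' := by
        apply ih _ (List.pairwise_cons.1 h1).2 (List.pairwise_cons.1 h2).2
        intro x
        constructor
        · intro hx
          have := (hm x).1 (by simp [hx])
          rcases (by simpa using this) with h | h
          · exact absurd hx (by subst h; intro hc; exact absurd ((List.pairwise_cons.1 h1).1 x hc) (by omega))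
          · exact h
        · intro hx
          have := (hm x).2 (by simp [hx])
          rcases (by simpa using this) with h | h
          · exact absurd hx (by subst h; intro hc; exact absurd ((List.pairwise_cons.1 h2).1 x hc) (by omega))
          · exact h
      rw [ht]

lemma pairwise_lt_pyRange_pos (a b s : Int) (hs : 0 < s) :
    (PySem.List.pyRange a b s).Pairwise (· < ·) := by
  rw [PySem.List.pyRange_of_pos a b hs]
  refine List.Pairwise.map _ ?_ (List.pairwise_lt_range)
  intro x y hxy
  have : s * (x : Int) < s * (y : Int) := by
    have : (x : Int) < (y : Int) := by exact_mod_cast hxy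
    exact mul_lt_mul_of_pos_left this hs
  omega

-- extending range(i, k, m) by one more index k
lemma pyRange_step (i k m : Int) (hm : 0 < m) (_hi : 0 ≤ i) (him : i < m) (hk : 0 ≤ k) :
    PySem.List.pyRange i (k + 1) m =
      PySem.List.pyRange i k m ++ (if m ∣ (k - i) then [k] else []) := by
  by_cases hd : m ∣ (k - i)
  · have hik : i ≤ k := by
      obtain ⟨c, hc⟩ := hd
      by_cases h : 0 ≤ c
      · nlinarith
      · exfalso
        have hc1 : c ≤ -1 := by omega
        have : m * c ≤ m * (-1) := by
          exact mul_le_mul_of_nonneg_left hc1 (le_of_lt hm)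
        omega
    simp only [hd, if_pos]
    apply eq_of_pairwise_lt_of_mem_iff
    · exact pairwise_lt_pyRange_pos _ _ _ hm
    · rw [List.pairwise_append]
      refine ⟨pairwise_lt_pyRange_pos _ _ _ hm, by simp, ?_⟩
      intro x hx y hy
      have := (PySem.List.mem_pyRange_iff_of_pos hm x).1 hx
      simp at hy
      omega
    · intro x
      simp only [List.mem_append, PySem.List.mem_pyRange_iff_of_pos hm, List.mem_singleton]
      constructor
      · rintro ⟨h1, h2, h3⟩
        by_cases hxk : x = k
        · exact Or.inr hxk
        · exact Or.inl ⟨h1, by omega, h3⟩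
      · rintro (⟨h1, h2, h3⟩ | h)
        · exact ⟨h1, by omega, h3⟩
        · subst h; exact ⟨hik, by omega, hd⟩
  · simp only [hd, if_neg, not_false_iff, List.append_nil]
    apply eq_of_pairwise_lt_of_mem_iff
    · exact pairwise_lt_pyRange_pos _ _ _ hm
    · exact pairwise_lt_pyRange_pos _ _ _ hm
    · intro x
      simp only [PySem.List.mem_pyRange_iff_of_pos hm]
      constructor
      · rintro ⟨h1, h2, h3⟩
        refine ⟨h1, ?_, h3⟩
        by_cases hxk : x = k
        · exact absurd (hxk ▸ h3) hd
        · omega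
      · rintro ⟨h1, h2, h3⟩
        exact ⟨h1, by omega, h3⟩

-- 'j % m == i' is divisibility of j - i, for 0 ≤ i < m
lemma mod_eq_iff_dvd (j i m : Int) (hm : 0 < m) (hi : 0 ≤ i) (him : i < m) :
    PySem.Int.mod j m = i ↔ m ∣ (j - i) := by
  rw [PySem.Int.mod_eq_emod_of_pos hm]
  constructor
  · intro h
    have : (j - i) % m = 0 := by
      rw [Int.sub_emod, h]
      simp
    exact Int.dvd_of_emod_eq_zero this
  · intro h
    obtain ⟨c, hc⟩ := h
    have : j % m = (i + m * c) % m := by rw [← hc]; ring_nf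
    rw [this, Int.add_mul_emod_self_left]
    exact Int.emod_eq_of_lt hi him

lemma pyRange_pos_eq_nil (i m : Int) (_hi : 0 ≤ i) (hm : 0 < m) :
    PySem.List.pyRange i 0 m = [] := by
  rw [PySem.List.pyRange_of_pos _ _ hm]
  have : ¬ (i < 0) := by omega
  simp [this]

-- B's single pass over range(t) fills column i with range(i, t, m)
lemma alt_invariant (m : Int) (hm : 0 < m) (t : Nat) :
    (PySem.List.pyRange 0 (t : Int) 1).foldl
      (fun cols j => cols.modify (PySem.Int.mod j m).toNat (fun col => col ++ [j]))
      (List.replicate m.toNat []) =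
    (PySem.List.pyRange 0 m 1).map (fun i => PySem.List.pyRange i (t : Int) m) := by
  induction t with
  | zero =>
    rw [PySem.List.pyRange_one_eq_nil (by omega)]
    simp only [List.foldl_nil]
    rw [List.map_congr_left (fun i hi => by
      have := (PySem.List.mem_pyRange_one.1 hi).1
      exact pyRange_pos_eq_nil i m this hm)]
    rw [List.map_const', PySem.List.length_pyRange_one]
    norm_num
  | succ t ih =>
    have hcast : ((t + 1 : Nat) : Int) = (t : Int) + 1 := by push_cast; ring
    rw [hcast, PySem.List.pyRange_one_succ_right (by positivity), List.foldl_append, ih]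
    simp only [List.foldl_cons, List.foldl_nil]
    apply List.ext_getElem
    · simp [List.length_modify]
    · intro u h1 h2
      rw [List.getElem_modify]
      have hu : u < (PySem.List.pyRange 0 m 1).length := by
        simpa [List.length_modify] using h1
      have hu' : (u : Int) < m := by
        have := hu
        rw [PySem.List.length_pyRange_one] at this
        omega
      have hget : ∀ (b : Int), ((PySem.List.pyRange 0 m 1).map
          (fun i => PySem.List.pyRange i b m))[u]'(by simpa using hu) =
          PySem.List.pyRange (u : Int) b m := by
        intro b
        rw [List.getElem_map]
        congr 1
        simp [PySem.List.getElem_pyRange_one]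
      rw [List.getElem_map]
      have hgm := PySem.List.getElem_pyRange_one 0 m u hu
      simp only [zero_add] at hgm
      rw [hgm, hget]
      rw [pyRange_step (u : Int) (t : Int) m hm (by positivity) hu' (by positivity)]
      by_cases hc : PySem.Int.mod (t : Int) m = (u : Int)
      · have hdvd : m ∣ ((t : Int) - u) :=
          (mod_eq_iff_dvd _ _ _ hm (by positivity) hu').1 hc
        have : (PySem.Int.mod (t : Int) m).toNat = u := by
          rw [hc]; simp
        simp [this, hdvd]
      · have hdvd : ¬ m ∣ ((t : Int) - u) := fun h =>
          hc ((mod_eq_iff_dvd _ _ _ hm (by positivity) hu').2 h)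
        have hne : (PySem.Int.mod (t : Int) m).toNat ≠ u := by
          intro h
          apply hc
          have hnn : 0 ≤ PySem.Int.mod (t : Int) m := PySem.Int.mod_nonneg _ hm
          omega
        simp [hne, hdvd]

-- A's fold appends one nonempty strided range per column
lemma a_eq_map (n m : Int) (hm : 0 < m) (hmn : m ≤ n) :
    (PySem.List.pyRange 0 m 1).foldl
      (fun slices i =>
        let indices := PySem.List.pyRange i n m
        if indices ≠ [] then slices ++ [indices] else slices)
      [] =
    (PySem.List.pyRange 0 m 1).map (fun i => PySem.List.pyRange i n m) := by
  rw [PySem.List.foldl_congr_mem _ _ (fun slices i => slices ++ [PySem.List.pyRange i n m]) _ ?_]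
  · exact PySem.List.foldl_append_singleton_eq_map _ _ []
  · intro acc i hi
    have hmem := PySem.List.mem_pyRange_one.1 hi
    have hne : PySem.List.pyRange i n m ≠ [] := by
      intro h
      have : i ∈ PySem.List.pyRange i n m := by
        rw [PySem.List.mem_pyRange_iff_of_pos hm]
        exact ⟨le_refl i, by omega, by simp⟩
      rw [h] at this
      simp at this
    simp [hne]

-- ===== VERDICT (by name: the statement is the Claim_ definition above) =====
theorem get_slices_rows_first_spec : Claim_equal_get_slices_rows_first := by
  intro n_inputs n_cols _
  unfold Spec_get_slices_rows_first get_slices_rows_first get_slices_rows_first_alt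
  by_cases hm : min n_cols n_inputs ≤ 0
  · simp only [hm, if_pos]
    by_cases hn : n_inputs = 0
    · simp [hn]
    · simp only [hn, if_neg, not_false_iff]
      rw [PySem.List.pyRange_one_eq_nil hm]
      simp
  · replace hm : 0 < min n_cols n_inputs := by omega
    have hn0 : n_inputs ≠ 0 := by
      have : min n_cols n_inputs ≤ n_inputs := min_le_right _ _
      omega
    simp only [hn0, if_neg, not_false_iff, if_neg (by omega : ¬ min n_cols n_inputs ≤ 0)]
    set m := min n_cols n_inputs with hmdef
    have hmn : m ≤ n_inputs := min_le_right _ _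
    rw [a_eq_map n_inputs m hm hmn]
    have ht : n_inputs = ((n_inputs.toNat : Nat) : Int) := by omega
    rw [ht, alt_invariant m hm n_inputs.toNat]
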